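-- pv_equiv track=rewrite | github.com/lvyunyunSCI/EasyCen | easycen/kmer_pairs.py | scan_sequence_rolling
-- ===== SOURCE A (Python) =====
-- BASE2VAL = {ord('A'):0, ord('C'):1, ord('G'):2, ord('T'):3,
--             ord('a'):0, ord('c'):1, ord('g'):2, ord('t'):3}
--
-- def is_valid_dna_sequence(seq: str) -> bool:
--     """Check if sequence contains only valid DNA bases"""
--     if not seq:
--         return False
--     for c in seq:
--         if c not in 'ATCGatcg':
--             return False
--     return True
--
-- def kmer_to_int(kmer: str):
--     """Encode kmer (A/C/G/T) to integer using 2 bits/base. Return None if invalid base."""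
--     v = 0
--     for ch in kmer:
--         try:
--             b = BASE2VAL[ord(ch)]
--         except KeyError:
--             return None
--         v = (v << 2) | b
--     return v
--
-- def canonical_int_for_kmer_str(kmer: str):
--     """Return canonical integer (min of forward and reverse-complement ints)."""
--     k = len(kmer)
--     fwd = kmer_to_int(kmer)
--     if fwd is None:
--         return None
--     # reverse complement integer:
--     rc = 0
--     for ch in reversed(kmer):
--         try:
--             b = BASE2VAL[ord(ch)]
--         except KeyError:
--             return None
--         comp = 3 - b
--         rc = (rc << 2) | comp
--     return min(fwd, rc)
--
-- def scan_sequence_rolling(seq: str, k: int, kmer_int_set: set, canonical_form: bool=True):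
--     """
--     Yield matches as tuples: (canonical_int_or_kmer_key, position (0-based), original_kmer_str)
--     Uses integer rolling for speed if k <= 31 (fits in 64 bits).
--     """
--     seq_bytes = seq.encode('ascii', 'ignore')
--     n = len(seq_bytes)
--     if n < k:
--         return
--
--     # If k is large (can't fit in 64-bit), fallback to string method
--     if k > 31:
--         # fallback: slice & check (less optimal)
--         for i in range(0, n - k + 1):
--             kstr = seq[i:i+k]
--             kstr_s = kstr.decode()
--             if not is_valid_dna_sequence(kstr_s):
--                 continue
--             key = kstr_s.upper() if not canonical_form else canonical_int_for_kmer_str(kstr_s)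
--             if key is None:
--                 continue
--             if (key in kmer_int_set) if canonical_form else (kstr_s.upper() in kmer_int_set):
--                 yield key, i, kstr_s
--         return
--
--     mask = (1 << (2*k)) - 1
--     shift = 2*(k-1)
--     fwd = 0
--     rc = 0
--     valid_run = 0  # length of current valid window of A/C/G/T
--     # precompute for speed
--     b2v_local = BASE2VAL
--
--     for i in range(n):
--         c = seq_bytes[i]
--         if c not in b'ACGTacgt':
--             # reset
--             fwd = 0
--             rc = 0
--             valid_run = 0
--             continue
--         v = b2v_local[c]
--         # update forward: append base
--         fwd = ((fwd << 2) & mask) | v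
--         # update reverse complement: shift right and add complement at high bits
--         comp = 3 - v
--         rc = (rc >> 2) | (comp << shift)
--         valid_run += 1
--         if valid_run >= k:
--             pos = i - k + 1
--             canonical = min(fwd, rc) if canonical_form else fwd
--             if canonical in kmer_int_set:
--                 # reconstruct original k-mer string for strand info
--                 kmer_bytes = seq_bytes[pos:pos+k]
--                 yield canonical, pos, kmer_bytes.decode()
--     return
-- ===== SOURCE B (Python) =====
-- def scan_sequence_rolling(seq: str, k: int, kmer_int_set: set, canonical_form: bool=True):
--     """Same matches as the rolling version, but each window is recomputed
--     independently with the module's canonical_int_for_kmer_str / kmer_to_int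
--     helpers instead of maintaining rolling forward/reverse-complement state."""
--     seq_bytes = seq.encode('ascii', 'ignore')
--     n = len(seq_bytes)
--     if k < 1 or n < k:
--         return
--     valid = b'ACGTacgt'
--     for pos in range(n - k + 1):
--         window = seq_bytes[pos:pos+k]
--         if any(b not in valid for b in window):
--             continue
--         s = window.decode()
--         key = canonical_int_for_kmer_str(s) if canonical_form else kmer_to_int(s)
--         if key in kmer_int_set:
--             yield key, pos, s
--
-- BASE2VAL = {ord('A'):0, ord('C'):1, ord('G'):2, ord('T'):3,
--             ord('a'):0, ord('c'):1, ord('g'):2, ord('t'):3}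
--
-- def kmer_to_int(kmer: str):
--     v = 0
--     for ch in kmer:
--         try:
--             b = BASE2VAL[ord(ch)]
--         except KeyError:
--             return None
--         v = (v << 2) | b
--     return v
--
-- def canonical_int_for_kmer_str(kmer: str):
--     fwd = kmer_to_int(kmer)
--     if fwd is None:
--         return None
--     rc = 0
--     for ch in reversed(kmer):
--         b = BASE2VAL[ord(ch)]
--         comp = 3 - b
--         rc = (rc << 2) | comp
--     return min(fwd, rc)
-- ===== Notes on version B (the rewrite author's own statement) =====
-- stated objective: simpler
-- what changed: The rolling-hash scan that maintains forward/reverse-complement integers and a valid_run counter across the sequence is replaced by an independent per-window recomputation: for each position the window slice is validity-checked and its key recomputed from scratch with the module's canonical_int_for_kmer_str / kmer_to_int helpers.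
-- crash fix: A raises AttributeError when k > 31 and a window exists (the fallback branch calls .decode() on a str slice), and ValueError when k < 0 or when k = 0 and the sequence contains a valid base (1 << negative / negative shift count); B returns [] for non-positive k and its window matches otherwise. — e.g. on scan_sequence_rolling("AAAAAAAAAAAAAAAAAAAAAAAAAAAAAAAAA", 33, [0], true): A raises AttributeError, B returns [(0, 0, "AAAAAAAAAAAAAAAAAAAAAAAAAAAAAAAAA")]
import Mathlib
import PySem

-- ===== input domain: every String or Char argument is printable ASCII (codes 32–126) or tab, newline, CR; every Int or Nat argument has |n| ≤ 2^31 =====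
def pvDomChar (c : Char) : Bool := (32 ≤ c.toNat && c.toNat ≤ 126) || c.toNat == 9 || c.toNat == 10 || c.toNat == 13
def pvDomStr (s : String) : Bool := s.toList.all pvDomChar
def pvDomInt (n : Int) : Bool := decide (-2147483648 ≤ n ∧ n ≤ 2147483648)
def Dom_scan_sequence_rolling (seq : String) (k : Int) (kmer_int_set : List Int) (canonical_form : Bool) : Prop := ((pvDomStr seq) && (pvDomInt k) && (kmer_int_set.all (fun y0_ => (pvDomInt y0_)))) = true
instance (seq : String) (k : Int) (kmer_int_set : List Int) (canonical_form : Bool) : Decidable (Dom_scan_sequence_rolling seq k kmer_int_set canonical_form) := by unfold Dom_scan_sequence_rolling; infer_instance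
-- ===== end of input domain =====

-- B replaces A's maintained rolling forward/reverse-complement state with an independent
-- per-window recomputation via the module's kmer helpers (objective: simpler; not faster).

-- ===== PORT A =====
-- `c in b'ACGTacgt'` (equivalently: ord(c) is a key of BASE2VAL)
def pvValid (c : Char) : Bool :=
  c == 'A' || c == 'C' || c == 'G' || c == 'T' || c == 'a' || c == 'c' || c == 'g' || c == 't'

-- BASE2VAL[ord(c)] for the valid bases (callers only use it on valid bases)
def pvB2V (c : Char) : Nat :=
  if c == 'A' || c == 'a' then 0
  else if c == 'C' || c == 'c' then 1
  else if c == 'G' || c == 'g' then 2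
  else 3

-- the main `for i in range(n)` loop of A; state (i, fwd, rc, valid_run), all values Nat
-- (they are nonnegative Python ints).  seq_bytes[pos:pos+k] with 0 ≤ pos is ported as
-- (all.drop pos).take k — exact: the slice clamps at the end exactly like drop/take.
def pvLoopA (all : List Char) (k mask shift : Nat) (st : List Int) (cf : Bool) :
    List Char → Nat → Nat → Nat → Nat → List (Int × Int × String)
  | [], _, _, _, _ => []
  | c :: rest, i, fwd, rc, run =>
    if pvValid c = false then
      pvLoopA all k mask shift st cf rest (i + 1) 0 0 0
    else
      let v := pvB2V c
      let fwd' := ((fwd <<< 2) &&& mask) ||| v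
      let rc' := (rc >>> 2) ||| ((3 - v) <<< shift)
      let run' := run + 1
      if k ≤ run' then
        let pos := i + 1 - k
        let canonical := if cf then min fwd' rc' else fwd'
        (if (canonical : Int) ∈ st then [((canonical : Int), (pos : Int), String.mk ((all.drop pos).take k))] else []) ++
          pvLoopA all k mask shift st cf rest (i + 1) fwd' rc' run'
      else
        pvLoopA all k mask shift st cf rest (i + 1) fwd' rc' run'

def scan_sequence_rolling (seq : String) (k : Int) (kmer_int_set : List Int) (canonical_form : Bool) : List (Int × Int × String) :=
  let seq_bytes := seq.toList  -- seq.encode('ascii','ignore'): identity on Dom (ASCII-only strings)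
  let n : Int := seq_bytes.length
  if n < k then []
  else if 31 < k then []  -- Python raises AttributeError here (seq[i:i+k].decode() on a str); excluded by Pre_
  else if k ≤ 0 then []   -- Python raises ValueError (1 << negative, or a negative shift count at the first
                          -- valid base); where it instead returns (k = 0, no valid base) it returns [] — as here.
                          -- Excluded by Pre_.
  else
    let kn := k.toNat
    pvLoopA seq_bytes kn ((1 <<< (2 * kn)) - 1) (2 * (kn - 1)) kmer_int_set canonical_form seq_bytes 0 0 0 0

-- ===== PORT B =====
-- kmer_to_int with its accumulator; the KeyError branch is the validity test
def pvKmerToInt : List Char → Nat → Option Nat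
  | [], v => some v
  | c :: rest, v => if pvValid c then pvKmerToInt rest ((v <<< 2) ||| pvB2V c) else none

-- the rc loop of canonical_int_for_kmer_str (runs over reversed(kmer))
def pvRcInt : List Char → Nat → Nat
  | [], rc => rc
  | c :: rest, rc => pvRcInt rest ((rc <<< 2) ||| (3 - pvB2V c))

def pvCanonicalInt? (w : List Char) : Option Nat :=
  match pvKmerToInt w 0 with
  | none => none
  | some fwd => some (min fwd (pvRcInt w.reverse 0))

-- body of B's `for pos in range(n - k + 1)` loop
def pvEmit (cs : List Char) (k : Int) (st : List Int) (cf : Bool) (pos : Int) : List (Int × Int × String) :=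
  let window := PySem.List.slice cs (some pos) (some (pos + k))   -- seq_bytes[pos:pos+k]
  if window.any (fun c => !pvValid c) then []
  else
    match (if cf then pvCanonicalInt? window else pvKmerToInt window 0) with
    | some key => if (key : Int) ∈ st then [((key : Int), pos, String.mk window)] else []
    | none => []

def scan_sequence_rolling_alt (seq : String) (k : Int) (kmer_int_set : List Int) (canonical_form : Bool) : List (Int × Int × String) :=
  let seq_bytes := seq.toList  -- seq.encode('ascii','ignore'): identity on Dom (ASCII-only strings)
  let n : Int := seq_bytes.length
  if k < 1 ∨ n < k then []
  else (PySem.List.pyRange 0 (n - k + 1) 1).flatMap (pvEmit seq_bytes k kmer_int_set canonical_form)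

-- ===== PRECONDITION & SPEC =====
-- Pre_ excludes exactly the inputs where A raises (k > 31 with a window to scan: AttributeError on
-- str.decode; k < 0: ValueError on 1 << negative; k = 0 with a valid base: ValueError on a
-- negative shift count).
def Pre_scan_sequence_rolling (seq : String) (k : Int) (kmer_int_set : List Int) (canonical_form : Bool) : Prop :=
  (1 ≤ k ∧ (k ≤ 31 ∨ (seq.toList.length : Int) < k))
    ∨ (k = 0 ∧ seq.toList.all (fun c => !pvValid c) = true)
instance (seq : String) (k : Int) (kmer_int_set : List Int) (canonical_form : Bool) : Decidable (Pre_scan_sequence_rolling seq k kmer_int_set canonical_form) := by unfold Pre_scan_sequence_rolling; infer_instance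

def pvWitness_scan_sequence_rolling : String × Int × List Int × Bool := ("ACGTACGT", 3, [6, 27], true)

-- A raises (AttributeError for k > 31 reaching a window; ValueError for k < 0, or for k = 0 meeting
-- a valid base) where B just scans — returning [] for non-positive k, its matches otherwise.
def Raises_scan_sequence_rolling (seq : String) (k : Int) (kmer_int_set : List Int) (canonical_form : Bool) : Prop :=
  k < 0 ∨ (k = 0 ∧ seq.toList.any pvValid = true) ∨ (31 < k ∧ k ≤ (seq.toList.length : Int))
instance (seq : String) (k : Int) (kmer_int_set : List Int) (canonical_form : Bool) : Decidable (Raises_scan_sequence_rolling seq k kmer_int_set canonical_form) := by unfold Raises_scan_sequence_rolling; infer_instance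

def pvRaiseWitness_scan_sequence_rolling : String × Int × List Int × Bool :=
  ("AAAAAAAAAAAAAAAAAAAAAAAAAAAAAAAAA", 33, [0], true)
def pvRaiseWitnessOut_scan_sequence_rolling : List (Int × Int × String) :=
  [(0, 0, "AAAAAAAAAAAAAAAAAAAAAAAAAAAAAAAAA")]

def Spec_scan_sequence_rolling (seq : String) (k : Int) (kmer_int_set : List Int) (canonical_form : Bool) (out : List (Int × Int × String)) : Prop := out = scan_sequence_rolling_alt seq k kmer_int_set canonical_form
instance (seq : String) (k : Int) (kmer_int_set : List Int) (canonical_form : Bool) (out : List (Int × Int × String)) : Decidable (Spec_scan_sequence_rolling seq k kmer_int_set canonical_form out) := by unfold Spec_scan_sequence_rolling; infer_instance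

-- ===== CLAIM (what is proved, stated in full; the proofs are below) =====
def Claim_equal_scan_sequence_rolling : Prop := ∀ (seq : String) (k : Int) (kmer_int_set : List Int) (canonical_form : Bool), Dom_scan_sequence_rolling seq k kmer_int_set canonical_form → Pre_scan_sequence_rolling seq k kmer_int_set canonical_form → Spec_scan_sequence_rolling seq k kmer_int_set canonical_form (scan_sequence_rolling seq k kmer_int_set canonical_form)
def Claim_raises_scan_sequence_rolling : Prop := (∀ (seq : String) (k : Int) (kmer_int_set : List Int) (canonical_form : Bool), Dom_scan_sequence_rolling seq k kmer_int_set canonical_form → Raises_scan_sequence_rolling seq k kmer_int_set canonical_form → ¬ Pre_scan_sequence_rolling seq k kmer_int_set canonical_form) ∧ (Dom_scan_sequence_rolling (pvRaiseWitness_scan_sequence_rolling.1) (pvRaiseWitness_scan_sequence_rolling.2.1) (pvRaiseWitness_scan_sequence_rolling.2.2.1) (pvRaiseWitness_scan_sequence_rolling.2.2.2) ∧ Raises_scan_sequence_rolling (pvRaiseWitness_scan_sequence_rolling.1) (pvRaiseWitness_scan_sequence_rolling.2.1) (pvRaiseWitness_scan_sequence_rolling.2.2.1) (pvRaiseWitness_scan_sequence_rolling.2.2.2)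 ∧ scan_sequence_rolling_alt (pvRaiseWitness_scan_sequence_rolling.1) (pvRaiseWitness_scan_sequence_rolling.2.1) (pvRaiseWitness_scan_sequence_rolling.2.2.1) (pvRaiseWitness_scan_sequence_rolling.2.2.2) = pvRaiseWitnessOut_scan_sequence_rolling)

-- ===== LEMMAS AND PROOFS =====

-- the plain 2-bit forward encoding of a window, and its reverse-complement encoding
def pvEncF (w : List Char) : Nat := w.foldl (fun a c => a * 4 + pvB2V c) 0
def pvEncR (w : List Char) : Nat := w.foldr (fun c a => (3 - pvB2V c) + 4 * a) 0

lemma pvB2V_le (c : Char) : pvB2V c ≤ 3 := by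
  unfold pvB2V; split_ifs <;> omega

-- x ||| (y <<< s) adds when x fits below the shift
lemma pvOrAdd (x y s : Nat) (h : x < 2 ^ s) : x ||| (y <<< s) = y * 2 ^ s + x := by
  rw [Nat.lor_comm, ← Nat.shiftLeft_add_eq_or_of_lt h y, Nat.shiftLeft_eq]

lemma pvEncF_foldl (l : List Char) (a : Nat) :
    l.foldl (fun a c => a * 4 + pvB2V c) a = a * 4 ^ l.length + pvEncF l := by
  induction l generalizing a with
  | nil => simp [pvEncF]
  | cons c t ih =>
    simp only [List.foldl_cons, List.length_cons]
    rw [ih]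
    have h2 : pvEncF (c :: t) = pvB2V c * 4 ^ t.length + pvEncF t := by
      unfold pvEncF
      simp only [List.foldl_cons]
      rw [ih]
      have : List.foldl (fun a c => a * 4 + pvB2V c) 0 t = pvEncF t := rfl
      rw [this]
      ring
    rw [h2]
    ring

lemma pvEncF_append (x y : List Char) : pvEncF (x ++ y) = pvEncF x * 4 ^ y.length + pvEncF y := by
  unfold pvEncF
  rw [List.foldl_append, pvEncF_foldl]
  rfl

lemma pvEncF_lt (w : List Char) : pvEncF w < 4 ^ w.length := by
  induction w using List.reverseRecOn with
  | nil => simp [pvEncF]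
  | append_singleton t c ih =>
    rw [pvEncF_append]
    have hv := pvB2V_le c
    have h1 : pvEncF [c] = pvB2V c := by simp [pvEncF]
    have h4 : (4:Nat) ^ (t ++ [c]).length = 4 ^ t.length * 4 := by
      simp [List.length_append]; ring
    rw [h1, h4]
    have h5 : (4:Nat) ^ [c].length = 4 := by norm_num
    rw [h5]
    omega

lemma pvEncR_cons (c : Char) (t : List Char) : pvEncR (c :: t) = (3 - pvB2V c) + 4 * pvEncR t := rfl

lemma pvEncR_append_singleton (w : List Char) (c : Char) :
    pvEncR (w ++ [c]) = pvEncR w + (3 - pvB2V c) * 4 ^ w.length := by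
  induction w with
  | nil => simp [pvEncR]
  | cons d t ih =>
    simp only [List.cons_append, pvEncR_cons, ih, List.length_cons]
    ring

lemma pvEncR_lt (w : List Char) : pvEncR w < 4 ^ w.length := by
  induction w with
  | nil => simp [pvEncR]
  | cons c t ih =>
    rw [pvEncR_cons]
    have := pvB2V_le c
    have h4 : 4 ^ (c :: t).length = 4 * 4 ^ t.length := by
      simp [List.length_cons]; ring
    omega

-- pvKmerToInt on an all-valid window is the forward encoding
lemma pvKmerToInt_valid (w : List Char) (a : Nat) (h : ∀ c ∈ w, pvValid c = true) :
    pvKmerToInt w a = some (w.foldl (fun a c => a * 4 + pvB2V c) a) := by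
  induction w generalizing a with
  | nil => simp [pvKmerToInt]
  | cons c t ih =>
    have hc : pvValid c = true := h c (by simp)
    have hv : pvB2V c < 2 ^ 2 := by have := pvB2V_le c; omega
    simp only [pvKmerToInt, hc, if_true, List.foldl_cons]
    rw [Nat.lor_comm, pvOrAdd _ a 2 hv, ih _ (fun c hm => h c (by simp [hm]))]
    norm_num [Nat.mul_comm]

lemma pvRcInt_foldl (l : List Char) (a : Nat) :
    pvRcInt l a = l.foldl (fun a c => a * 4 + (3 - pvB2V c)) a := by
  induction l generalizing a with
  | nil => rfl
  | cons c t ih =>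
    have hv : 3 - pvB2V c < 2 ^ 2 := by omega
    simp only [pvRcInt, List.foldl_cons]
    rw [Nat.lor_comm, pvOrAdd _ a 2 hv, ih]
    norm_num [Nat.mul_comm]

lemma pvRcInt_reverse (w : List Char) : pvRcInt w.reverse 0 = pvEncR w := by
  rw [pvRcInt_foldl, List.foldl_reverse]
  induction w with
  | nil => rfl
  | cons c t ih =>
    simp only [List.foldr_cons, pvEncR_cons, ih.symm]
    generalize (List.foldr (fun x acc => acc * 4 + (3 - pvB2V x)) 0 t) = z
    ring

lemma pvCanonicalInt_valid (w : List Char) (h : ∀ c ∈ w, pvValid c = true) :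
    pvCanonicalInt? w = some (min (pvEncF w) (pvEncR w)) := by
  unfold pvCanonicalInt?
  rw [pvKmerToInt_valid w 0 h, pvRcInt_reverse]
  simp [pvEncF]

-- (List.range M).drop p, p < M, starts with p
lemma pvRangeDrop (M p : Nat) (h : p < M) :
    (List.range M).drop p = p :: (List.range M).drop (p + 1) := by
  apply List.ext_getElem?
  intro j
  rcases j with _ | j
  · simp [h]
  · simp only [List.getElem?_drop, List.getElem?_cons_succ]
    congr 1
    omega

-- the window slice of B at a Nat position
lemma pvEmit_window (cs : List Char) (kn : Nat) (st : List Int) (cf : Bool) (j : Nat) :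
    pvEmit cs (kn : Int) st cf (j : Int) =
      (let window := (cs.drop j).take kn;
       if window.any (fun c => !pvValid c) then []
       else
         match (if cf then pvCanonicalInt? window else pvKmerToInt window 0) with
         | some key => if (key : Int) ∈ st then [((key : Int), (j : Int), String.mk window)] else []
         | none => []) := by
  unfold pvEmit
  rw [PySem.List.slice_natCast_add]

lemma pvEncF_cons (c : Char) (t : List Char) :
    pvEncF (c :: t) = pvB2V c * 4 ^ t.length + pvEncF t := by
  unfold pvEncF
  simp only [List.foldl_cons]
  rw [pvEncF_foldl]
  have : List.foldl (fun a c => a * 4 + pvB2V c) 0 t = pvEncF t := rfl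
  rw [this]
  ring

-- the key of a valid window in B
def pvKey (cf : Bool) (w : List Char) : Nat := if cf then min (pvEncF w) (pvEncR w) else pvEncF w

lemma pvMemWindow (all : List Char) (kn p : Nat) (ch : Char) (hm : ch ∈ (all.drop p).take kn) :
    ∃ j, p ≤ j ∧ j < p + kn ∧ j < all.length ∧ all.getD j 'A' = ch := by
  obtain ⟨t, ht, hg⟩ := List.getElem_of_mem hm
  have ht' : t < kn ∧ p + t < all.length := by
    simp only [List.length_take, List.length_drop, lt_min_iff] at ht
    omega
  refine ⟨p + t, by omega, by omega, ht'.2, ?_⟩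
  rw [List.getD_eq_getElem _ _ ht'.2, ← hg, List.getElem_take, List.getElem_drop]

lemma pvEmit_invalid (all : List Char) (kn : Nat) (st : List Int) (cf : Bool) (p j0 : Nat)
    (h1 : p ≤ j0) (h2 : j0 < p + kn) (h3 : j0 < all.length)
    (h4 : pvValid (all.getD j0 'A') = false) :
    pvEmit all (kn : Int) st cf (p : Int) = [] := by
  rw [pvEmit_window]
  have htl : j0 - p < ((all.drop p).take kn).length := by
    simp only [List.length_take, List.length_drop, lt_min_iff]
    omega
  have hany : ((all.drop p).take kn).any (fun c => !pvValid c) = true := by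
    rw [List.any_eq_true]
    refine ⟨((all.drop p).take kn)[j0 - p], List.getElem_mem htl, ?_⟩
    have he : ((all.drop p).take kn)[j0 - p]'htl = all.getD j0 'A' := by
      rw [List.getElem_take, List.getElem_drop, List.getD_eq_getElem _ _ h3]
      congr 1
      omega
    rw [he, h4]
    rfl
  simp [hany]

lemma pvEmit_valid (all : List Char) (kn : Nat) (st : List Int) (cf : Bool) (p : Nat)
    (hval : ∀ ch ∈ (all.drop p).take kn, pvValid ch = true) :
    pvEmit all (kn : Int) st cf (p : Int) =
      (if ((pvKey cf ((all.drop p).take kn)) : Int) ∈ st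
       then [(((pvKey cf ((all.drop p).take kn)) : Int), (p : Int), String.mk ((all.drop p).take kn))]
       else []) := by
  rw [pvEmit_window]
  have hany : ((all.drop p).take kn).any (fun c => !pvValid c) = false := by
    rw [List.any_eq_false]
    intro ch hm
    simp [hval ch hm]
  simp only [hany, Bool.false_eq_true, if_false]
  cases cf with
  | true =>
    rw [pvCanonicalInt_valid _ hval]
    simp [pvKey]
  | false =>
    rw [pvKmerToInt_valid _ 0 hval]
    simp [pvKey, pvEncF]

-- MAIN INVARIANT LEMMA
lemma pvLoopA_eq (all : List Char) (kn : Nat) (hk : 1 ≤ kn) (st : List Int) (cf : Bool) :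
    ∀ (suf : List Char) (i fwd rc run : Nat),
      all.drop i = suf →
      run ≤ i → i ≤ all.length →
      (∀ j, i - run ≤ j → j < i → pvValid (all.getD j 'A') = true) →
      (run = i ∨ pvValid (all.getD (i - run - 1) 'A') = false) →
      fwd = pvEncF ((all.take i).drop (i - min run kn)) →
      rc = 4 ^ (kn - min run kn) * pvEncR ((all.take i).drop (i - min run kn)) →
      pvLoopA all kn ((1 <<< (2 * kn)) - 1) (2 * (kn - 1)) st cf suf i fwd rc run
        = ((List.range (all.length + 1 - kn)).drop (i + 1 - kn)).flatMap
            (fun (j : Nat) => pvEmit all (kn : Int) st cf (j : Int)) := by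
  intro suf
  induction suf with
  | nil =>
    intro i fwd rc run hsuf hri hil hval hmax hfwd hrc
    have hi : all.length ≤ i := List.drop_eq_nil_iff.mp hsuf
    have h2 : (List.range (all.length + 1 - kn)).drop (i + 1 - kn) = [] := by
      apply List.drop_eq_nil_of_le
      simp only [List.length_range]
      omega
    rw [h2]
    rfl
  | cons c rest ih =>
    intro i fwd rc run hsuf hri hil hval hmax hfwd hrc
    have hi : i < all.length := by
      by_contra h
      push_neg at h
      rw [List.drop_eq_nil_of_le h] at hsuf
      simp at hsuf
    have hc : all.getD i 'A' = c := by
      have h0 : (all.drop i)[0]? = some c := by rw [hsuf]; rfl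
      rw [List.getElem?_drop, Nat.add_zero] at h0
      simp [List.getD, h0]
    have hgi : all[i]'hi = c := by
      rw [← List.getD_eq_getElem all 'A' hi, hc]
    have hrest : all.drop (i + 1) = rest := by
      have h1 : all.drop (i + 1) = (all.drop i).drop 1 := by
        rw [List.drop_drop]
      rw [h1, hsuf]
      rfl
    -- the new suffix of take (i+1)
    have hTS : ∀ q, q ≤ i → (all.take (i + 1)).drop q = (all.take i).drop q ++ [c] := by
      intro q hq
      rw [List.take_succ_eq_append_getElem hi,
          List.drop_append_of_le_length (by simp [List.length_take]; omega), hgi]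
    by_cases hv : pvValid c = true
    · -- valid base
      have hmle1 : min run kn ≤ run := Nat.min_le_left _ _
      have hmle2 : min run kn ≤ kn := Nat.min_le_right _ _
      have hwlen : ((all.take i).drop (i - min run kn)).length = min run kn := by
        simp only [List.length_drop, List.length_take]
        omega
      have hfwdlt : fwd < 4 ^ min run kn := by
        rw [hfwd]
        have := pvEncF_lt ((all.take i).drop (i - min run kn))
        rwa [hwlen] at this
      have hrclt : rc < 4 ^ kn := by
        rw [hrc]
        have h1 := pvEncR_lt ((all.take i).drop (i - min run kn))
        rw [hwlen] at h1
        calc 4 ^ (kn - min run kn) * pvEncR ((all.take i).drop (i - min run kn))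
            < 4 ^ (kn - min run kn) * 4 ^ min run kn := by gcongr
          _ = 4 ^ kn := by rw [← pow_add]; congr 1; omega
      have hFval : ((fwd <<< 2) &&& ((1 <<< (2 * kn)) - 1)) ||| pvB2V c
          = (fwd % 4 ^ (kn - 1)) * 4 + pvB2V c := by
        have h1 : (1 : Nat) <<< (2 * kn) = 2 ^ (2 * kn) := by
          rw [Nat.shiftLeft_eq, one_mul]
        rw [Nat.shiftLeft_eq, h1, Nat.and_two_pow_sub_one_eq_mod]
        have h2 : (2 : Nat) ^ (2 * kn) = 4 ^ (kn - 1) * 4 := by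
          rw [show 2 * kn = 2 * (kn - 1) + 2 from by omega, pow_add, pow_mul]
          norm_num
        rw [h2, show (2 : Nat) ^ 2 = 4 from by norm_num, Nat.mul_mod_mul_right]
        have hv4 : pvB2V c < 2 ^ 2 := by have := pvB2V_le c; omega
        rw [Nat.lor_comm, show (fwd % 4 ^ (kn - 1)) * 4 = (fwd % 4 ^ (kn - 1)) <<< 2 from by
          rw [Nat.shiftLeft_eq], pvOrAdd _ _ 2 hv4, Nat.shiftLeft_eq]
        try norm_num
      have hRval : (rc >>> 2) ||| ((3 - pvB2V c) <<< (2 * (kn - 1)))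
          = (3 - pvB2V c) * 4 ^ (kn - 1) + rc / 4 := by
        rw [Nat.shiftRight_eq_div_pow]
        have hp4 : (2 : Nat) ^ (2 * (kn - 1)) = 4 ^ (kn - 1) := by
          rw [pow_mul]; norm_num
        have hlt : rc / 2 ^ 2 < 2 ^ (2 * (kn - 1)) := by
          rw [hp4, show (2 : Nat) ^ 2 = 4 from by norm_num]
          rw [Nat.div_lt_iff_lt_mul (by norm_num : 0 < 4)]
          calc rc < 4 ^ kn := hrclt
            _ = 4 ^ (kn - 1) * 4 := by rw [← pow_succ]; congr 1; omega
        rw [pvOrAdd _ _ _ hlt, hp4, show (2 : Nat) ^ 2 = 4 from by norm_num]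
      -- unfold one step of the loop
      rw [pvLoopA]
      simp only [hv, Bool.true_eq_false, if_false]
      by_cases hkr : kn ≤ run + 1
      · -- a window is complete: emission position p = i + 1 - kn
        have hknle : kn ≤ i + 1 := by omega
        have hW' : (all.take (i + 1)).drop (i + 1 - kn) = (all.drop (i + 1 - kn)).take kn := by
          rw [List.drop_take]
          congr 1
          omega
        have hFR : ((fwd <<< 2) &&& ((1 <<< (2 * kn)) - 1)) ||| pvB2V c
              = pvEncF ((all.take (i + 1)).drop (i + 1 - kn))
            ∧ (rc >>> 2) ||| ((3 - pvB2V c) <<< (2 * (kn - 1)))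
              = pvEncR ((all.take (i + 1)).drop (i + 1 - kn)) := by
          by_cases hrk : run < kn
          · have hrun : run = kn - 1 := by omega
            have hm : min run kn = run := by omega
            have hw'app : (all.take (i + 1)).drop (i + 1 - kn)
                = ((all.take i).drop (i - min run kn)) ++ [c] := by
              rw [hTS (i + 1 - kn) (by omega), hm, show i + 1 - kn = i - run from by omega]
            constructor
            · rw [hw'app, pvEncF_append, hFval, hfwd]
              have hmod : pvEncF ((all.take i).drop (i - min run kn)) % 4 ^ (kn - 1)
                  = pvEncF ((all.take i).drop (i - min run kn)) := by
                apply Nat.mod_eq_of_lt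
                rw [← hfwd, show kn - 1 = min run kn from by omega]
                exact hfwdlt
              rw [hmod]
              have h1 : pvEncF [c] = pvB2V c := by simp [pvEncF]
              rw [h1]
              norm_num
            · rw [hw'app, pvEncR_append_singleton, hwlen, hRval, hrc]
              have hdiv : 4 ^ (kn - min run kn) * pvEncR ((all.take i).drop (i - min run kn)) / 4
                  = pvEncR ((all.take i).drop (i - min run kn)) := by
                rw [show kn - min run kn = 1 from by omega, pow_one]
                exact Nat.mul_div_cancel_left _ (by norm_num)
              rw [hdiv, hm, hrun]
              ring
          · have hm : min run kn = kn := by omega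
            have hkni : kn ≤ i := by omega
            have hne : (all.take i).drop (i - min run kn) ≠ [] := by
              intro h0
              rw [h0] at hwlen
              simp at hwlen
              omega
            obtain ⟨d, t, hwdt⟩ := List.ne_nil_iff_exists_cons.mp hne
            have htlen : t.length = kn - 1 := by
              have h0 := hwlen
              rw [hwdt] at h0
              simp at h0
              omega
            rw [hm] at hwdt
            have htw : (all.take i).drop (i - (kn - 1)) = t := by
              have h1 := congrArg (List.drop 1) hwdt
              simp only [List.drop_drop] at h1
              rw [show i - (kn - 1) = i - kn + 1 from by omega]
              simpa using h1
            have hw'app : (all.take (i + 1)).drop (i + 1 - kn) = t ++ [c] := by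
              rw [hTS (i + 1 - kn) (by omega), show i + 1 - kn = i - (kn - 1) from by omega, htw]
            constructor
            · rw [hw'app, hFval, hfwd, hm, hwdt, pvEncF_cons, htlen]
              have hlt : pvEncF t < 4 ^ (kn - 1) := by
                have := pvEncF_lt t
                rwa [htlen] at this
              rw [Nat.mul_comm (pvB2V d) (4 ^ (kn - 1)), Nat.mul_add_mod, Nat.mod_eq_of_lt hlt, pvEncF_append]
              have h1 : pvEncF [c] = pvB2V c := by simp [pvEncF]
              rw [h1]
              norm_num
            · rw [hw'app, hRval, hrc, hm, hwdt, pvEncR_cons, pvEncR_append_singleton, htlen]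
              have hvd := pvB2V_le d
              have hdiv : 4 ^ (kn - kn) * ((3 - pvB2V d) + 4 * pvEncR t) / 4 = pvEncR t := by
                rw [Nat.sub_self, pow_zero, one_mul]
                omega
              rw [hdiv]
              ring
        -- window validity
        have hvalwin : ∀ ch ∈ (all.drop (i + 1 - kn)).take kn, pvValid ch = true := by
          intro ch hm'
          obtain ⟨j, hj1, hj2, hj3, hj4⟩ := pvMemWindow all kn (i + 1 - kn) ch hm'
          rcases Nat.lt_or_ge j i with hji | hji
          · rw [← hj4]
            exact hval j (by omega) hji
          · have hje : j = i := by omega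
            rw [← hj4, hje, hc]
            exact hv
        rw [if_pos hkr]
        have hpM : i + 1 - kn < all.length + 1 - kn := by omega
        rw [pvRangeDrop _ _ hpM, List.flatMap_cons]
        have htail := ih (i + 1) (((fwd <<< 2) &&& ((1 <<< (2 * kn)) - 1)) ||| pvB2V c)
          ((rc >>> 2) ||| ((3 - pvB2V c) <<< (2 * (kn - 1)))) (run + 1) hrest (by omega) (by omega)
          (by
            intro j h1 h2
            rcases Nat.lt_or_ge j i with hji | hji
            · exact hval j (by omega) hji
            · have hje : j = i := by omega
              rw [hje, hc]
              exact hv)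
          (by
            rcases hmax with h | h
            · left; omega
            · right
              rw [show i + 1 - (run + 1) - 1 = i - run - 1 from by omega]
              exact h)
          (by rw [show min (run + 1) kn = kn from by omega]; exact hFR.1)
          (by
            rw [show min (run + 1) kn = kn from by omega, Nat.sub_self, pow_zero, one_mul]
            exact hFR.2)
        rw [htail, show i + 1 + 1 - kn = (i + 1 - kn) + 1 from by omega]
        congr 1
        have hkey : pvKey cf ((all.drop (i + 1 - kn)).take kn)
            = (if cf then
                min (((fwd <<< 2) &&& ((1 <<< (2 * kn)) - 1)) ||| pvB2V c)
                  ((rc >>> 2) ||| ((3 - pvB2V c) <<< (2 * (kn - 1))))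
              else ((fwd <<< 2) &&& ((1 <<< (2 * kn)) - 1)) ||| pvB2V c) := by
          rw [pvKey, ← hW', ← hFR.1, ← hFR.2]
        rw [pvEmit_valid all kn st cf (i + 1 - kn) hvalwin, hkey]
      · -- window not yet complete
        rw [if_neg hkr]
        have hm : min run kn = run := by omega
        have hw'app : (all.take (i + 1)).drop (i + 1 - (run + 1))
            = ((all.take i).drop (i - min run kn)) ++ [c] := by
          rw [hTS (i + 1 - (run + 1)) (by omega), hm, show i + 1 - (run + 1) = i - run from by omega]
        have hFv : ((fwd <<< 2) &&& ((1 <<< (2 * kn)) - 1)) ||| pvB2V c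
            = pvEncF ((all.take i).drop (i - min run kn) ++ [c]) := by
          rw [hFval, hfwd, pvEncF_append]
          have hmod : pvEncF ((all.take i).drop (i - min run kn)) % 4 ^ (kn - 1)
              = pvEncF ((all.take i).drop (i - min run kn)) := by
            apply Nat.mod_eq_of_lt
            calc pvEncF ((all.take i).drop (i - min run kn)) < 4 ^ min run kn := by
                  rw [← hfwd]; exact hfwdlt
              _ ≤ 4 ^ (kn - 1) := Nat.pow_le_pow_right (by norm_num) (by omega)
          rw [hmod]
          have h1 : pvEncF [c] = pvB2V c := by simp [pvEncF]
          rw [h1]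
          norm_num
        have hRv : (rc >>> 2) ||| ((3 - pvB2V c) <<< (2 * (kn - 1)))
            = 4 ^ (kn - (run + 1)) * pvEncR ((all.take i).drop (i - min run kn) ++ [c]) := by
          rw [hRval, pvEncR_append_singleton, hwlen]
          have h41 : rc = 4 * (4 ^ (kn - run - 1) * pvEncR ((all.take i).drop (i - min run kn))) := by
            rw [hrc, hm]
            have h42 : (4 : Nat) ^ (kn - run) = 4 * 4 ^ (kn - run - 1) := by
              rw [← pow_succ']
              congr 1
              omega
            rw [h42]
            ring
          rw [h41, Nat.mul_div_cancel_left _ (by norm_num : 0 < 4), hm]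
          rw [Nat.mul_add, show (3 - pvB2V c) * 4 ^ (kn - 1)
              = 4 ^ (kn - (run + 1)) * ((3 - pvB2V c) * 4 ^ run) from by
            rw [show kn - 1 = (kn - (run + 1)) + run from by omega, pow_add]; ring]
          rw [show kn - run - 1 = kn - (run + 1) from by omega]
          ring
        have htail := ih (i + 1) (((fwd <<< 2) &&& ((1 <<< (2 * kn)) - 1)) ||| pvB2V c)
          ((rc >>> 2) ||| ((3 - pvB2V c) <<< (2 * (kn - 1)))) (run + 1) hrest (by omega) (by omega)
          (by
            intro j h1 h2
            rcases Nat.lt_or_ge j i with hji | hji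
            · exact hval j (by omega) hji
            · have hje : j = i := by omega
              rw [hje, hc]
              exact hv)
          (by
            rcases hmax with h | h
            · left; omega
            · right
              rw [show i + 1 - (run + 1) - 1 = i - run - 1 from by omega]
              exact h)
          (by rw [show min (run + 1) kn = run + 1 from by omega, hw'app]; exact hFv)
          (by rw [show min (run + 1) kn = run + 1 from by omega, hw'app]; exact hRv)
        rw [htail]
        by_cases hik : kn ≤ i + 1
        · have hp : i + 1 - kn < all.length + 1 - kn := by omega
          have hrlti : run < i := by omega
          rcases hmax with h | hinv
          · omega
          · rw [pvRangeDrop _ _ hp, List.flatMap_cons,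
              pvEmit_invalid all kn st cf (i + 1 - kn) (i - run - 1) (by omega) (by omega)
                (by omega) hinv,
              show i + 1 + 1 - kn = (i + 1 - kn) + 1 from by omega]
            simp
        · rw [show i + 1 + 1 - kn = 0 from by omega, show i + 1 - kn = 0 from by omega]
    · -- invalid base: reset
      have hvf : pvValid c = false := by
        cases h : pvValid c
        · rfl
        · exact absurd h hv
      rw [pvLoopA]
      simp only [hvf, if_true]
      rw [ih (i + 1) 0 0 0 hrest (by omega) (by omega)
        (by intro j h1 h2; omega)
        (by
          right
          rw [show i + 1 - 0 - 1 = i from by omega, hc]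
          exact hvf)
        (by
          have hnil : (all.take (i + 1)).drop (i + 1 - min 0 kn) = [] := by
            apply List.drop_eq_nil_of_le
            simp only [List.length_take]
            omega
          rw [hnil]
          simp [pvEncF])
        (by
          have hnil : (all.take (i + 1)).drop (i + 1 - min 0 kn) = [] := by
            apply List.drop_eq_nil_of_le
            simp only [List.length_take]
            omega
          rw [hnil]
          simp [pvEncR])]
      by_cases hik : kn ≤ i + 1
      · have hp : i + 1 - kn < all.length + 1 - kn := by omega
        rw [pvRangeDrop _ _ hp, List.flatMap_cons,
          pvEmit_invalid all kn st cf (i + 1 - kn) i (by omega) (by omega) hi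
            (by rw [hc]; exact hvf),
          show i + 1 + 1 - kn = (i + 1 - kn) + 1 from by omega]
        simp
      · rw [show i + 1 + 1 - kn = 0 from by omega, show i + 1 - kn = 0 from by omega]

-- ===== VERDICT (by name: the statement is the Claim_ definition above) =====
theorem scan_sequence_rolling_spec : Claim_equal_scan_sequence_rolling := by
  intro seq k st cf _ hpre
  unfold Spec_scan_sequence_rolling scan_sequence_rolling scan_sequence_rolling_alt
  by_cases hk0 : k < 1
  · -- only the k = 0, no-valid-base corner of Pre_: both sides return []
    have hke : k = 0 := by
      rcases hpre with ⟨h1, _⟩ | ⟨h1, _⟩ <;> omega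
    have hn0 : ¬ ((seq.toList.length : Int) < k) := by omega
    simp only [hn0, if_false, if_neg (show ¬((31 : Int) < k) from by omega),
      if_pos (show k ≤ 0 from by omega), if_pos (Or.inl hk0)]
  · have hk1 : (1 : Int) ≤ k := by omega
    have hk2 : k ≤ 31 ∨ (seq.toList.length : Int) < k := by
      rcases hpre with ⟨_, h2⟩ | ⟨h1, _⟩
      · exact h2
      · omega
    by_cases hlt : ((seq.toList.length : Int) < k)
    · simp only [hlt, if_true, or_true]
    · have hk31 : k ≤ 31 := by
        rcases hk2 with h | h
        · exact h
        · omega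
      simp only [hlt, if_false, if_neg (show ¬(31 < k) from by omega),
        if_neg (show ¬(k ≤ 0) from by omega), or_false, if_neg hk0]
      have hkeq : k = (k.toNat : Int) := by omega
      have hk1n : 1 ≤ k.toNat := by omega
      have hlen : k.toNat ≤ seq.toList.length := by omega
      rw [pvLoopA_eq seq.toList k.toNat hk1n st cf seq.toList 0 0 0 0 (by simp) (by omega) (by omega)
        (by intro j h1 h2; omega)
        (Or.inl rfl)
        (by
          have hnil : (seq.toList.take 0).drop (0 - min 0 k.toNat) = [] := by simp
          rw [hnil]
          simp [pvEncF])
        (by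
          have hnil : (seq.toList.take 0).drop (0 - min 0 k.toNat) = [] := by simp
          rw [hnil]
          simp [pvEncR])]
      rw [show 0 + 1 - k.toNat = 0 from by omega, List.drop_zero]
      rw [PySem.List.pyRange_one, List.flatMap_map]
      have hM : ((seq.toList.length : Int) - k + 1 - 0).toNat = seq.toList.length + 1 - k.toNat := by
        omega
      rw [hM]
      congr 1
      funext j
      rw [zero_add, ← hkeq]

theorem scan_sequence_rolling_raises : Claim_raises_scan_sequence_rolling := by
  unfold Claim_raises_scan_sequence_rolling
  constructor
  · intro seq k st cf _ hr hp
    rcases hp with ⟨h1, h2⟩ | ⟨h1, h2⟩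
    · rcases hr with h | ⟨h, _⟩ | ⟨h, h'⟩ <;> omega
    · rcases hr with h | ⟨h, hany⟩ | ⟨h, h'⟩
      · omega
      · rw [List.any_eq_true] at hany
        rw [List.all_eq_true] at h2
        obtain ⟨x, hx, hvx⟩ := hany
        have := h2 x hx
        rw [hvx] at this
        simp at this
      · omega
  · refine ⟨by decide, by decide, by decide⟩

-- self-check of the crash-fix witness: B's port really returns the stated value there
theorem pvRaiseWitness_scan_sequence_rolling_ok :
    scan_sequence_rolling_alt (pvRaiseWitness_scan_sequence_rolling.1)
      (pvRaiseWitness_scan_sequence_rolling.2.1) (pvRaiseWitness_scan_sequence_rolling.2.2.1)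
      (pvRaiseWitness_scan_sequence_rolling.2.2.2) = pvRaiseWitnessOut_scan_sequence_rolling :=
  scan_sequence_rolling_raises.2.2.2
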